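-- pv_equiv track=rewrite | github.com/wensby/advent-of-code | python/2020_10_2.py | split_by_3_diff
-- ===== SOURCE A (Python) =====
-- def split_by_3_diff(diffs):
--   parts = []
--   part = []
--   for diff in diffs:
--     if diff == 3:
--       if part:
--         parts.append(part)
--         part = []
--     else:
--       part.append(diff)
--   return parts
-- ===== SOURCE B (Python) =====
-- def split_by_3_diff(diffs):
--   # Recursive decomposition: emit each run terminated by a 3, recurse past it.
--   if 3 not in diffs:
--     return []
--   k = diffs.index(3)
--   head = [diffs[:k]] if k else []
--   return head + split_by_3_diff(diffs[k + 1:])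
-- ===== Notes on version B (the rewrite author's own statement) =====
-- stated objective: alternative
-- what changed: Replaces A's single loop with a parts/part accumulator pair by a recursion that locates the first 3 with index(), slices out the run before it, and recurses on the remainder.
import Mathlib
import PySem

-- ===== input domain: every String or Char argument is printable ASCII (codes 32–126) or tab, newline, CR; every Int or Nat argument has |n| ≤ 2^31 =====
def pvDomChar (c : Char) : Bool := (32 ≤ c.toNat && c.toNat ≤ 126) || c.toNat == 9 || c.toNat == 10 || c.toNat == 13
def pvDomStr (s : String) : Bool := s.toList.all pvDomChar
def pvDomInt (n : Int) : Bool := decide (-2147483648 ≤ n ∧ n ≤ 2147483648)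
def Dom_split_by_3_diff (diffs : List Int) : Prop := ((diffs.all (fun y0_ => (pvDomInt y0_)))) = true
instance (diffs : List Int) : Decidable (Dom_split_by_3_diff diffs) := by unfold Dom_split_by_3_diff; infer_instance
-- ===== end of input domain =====

-- B replaces A's accumulator loop by a find-first-3 / slice / recurse decomposition; same cost, different structure (return value equivalence).


-- ===== PORT A =====
-- the loop body of A, named so the invariant lemma can speak about it
def pvStepA (s : List (List Int) × List Int) (diff : Int) : List (List Int) × List Int :=
  if diff = 3 then
    if s.2 ≠ [] then (s.1 ++ [s.2], []) else s
  else
    (s.1, s.2 ++ [diff])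

def split_by_3_diff (diffs : List Int) : List (List Int) :=
  (diffs.foldl pvStepA ([], [])).1

-- ===== PORT B =====
-- needed by the port's decreasing_by
theorem pv_index_lt {diffs : List Int} {k : Nat}
    (h : PySem.List.index? diffs (3 : Int) = some k) : k < diffs.length := by
  obtain ⟨hk, _, _⟩ := PySem.List.getElem_of_index?_eq_some h
  exact hk

def split_by_3_diff_alt (diffs : List Int) : List (List Int) :=
  match h : PySem.List.index? diffs (3 : Int) with
  | none => []
  | some k =>
      (if k ≠ 0 then [PySem.List.slice diffs none (some (k : Int))] else []) ++
      split_by_3_diff_alt (PySem.List.slice diffs (some ((k : Int) + 1)) none)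
termination_by diffs.length
decreasing_by
  have hk := pv_index_lt h
  have : PySem.List.slice diffs (some ((k : Int) + 1)) none = diffs.drop (k + 1) := by
    have : ((k : Int) + 1) = ((k + 1 : Nat) : Int) := by push_cast; ring
    rw [this, PySem.List.slice_from_natCast]
  rw [this]
  simp [List.length_drop]
  omega

-- ===== PRECONDITION & SPEC =====
def Spec_split_by_3_diff (diffs : List Int) (out : List (List Int)) : Prop := out = split_by_3_diff_alt diffs
instance (diffs : List Int) (out : List (List Int)) : Decidable (Spec_split_by_3_diff diffs out) := by unfold Spec_split_by_3_diff; infer_instance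

-- ===== CLAIM (what is proved, stated in full; the proofs are below) =====
def Claim_equal_split_by_3_diff : Prop := ∀ (diffs : List Int), Dom_split_by_3_diff diffs → Spec_split_by_3_diff diffs (split_by_3_diff diffs)

-- ===== LEMMAS AND PROOFS =====

-- B on a 3-free list is []
theorem alt_no3 (diffs : List Int) (h : (3 : Int) ∉ diffs) :
    split_by_3_diff_alt diffs = [] := by
  rw [split_by_3_diff_alt, (PySem.List.index?_eq_none_iff diffs (3 : Int)).2 h]

-- B's step on pre ++ 3 :: t with pre 3-free
theorem alt_step (pre t : List Int) (h : (3 : Int) ∉ pre) :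
    split_by_3_diff_alt (pre ++ 3 :: t) =
      (if pre ≠ [] then [pre] else []) ++ split_by_3_diff_alt t := by
  have hidx : PySem.List.index? (pre ++ 3 :: t) (3 : Int) = some pre.length :=
    (PySem.List.index?_eq_some_iff (pre ++ 3 :: t) (3 : Int) pre.length).2
      ⟨pre, t, rfl, rfl, h⟩
  have hslice1 : PySem.List.slice (pre ++ 3 :: t) none (some (pre.length : Int)) = pre := by
    rw [PySem.List.slice_to_natCast]
    simp
  have hslice2 : PySem.List.slice (pre ++ 3 :: t) (some ((pre.length : Int) + 1)) none = t := by
    have hcast : ((pre.length : Int) + 1) = ((pre.length + 1 : Nat) : Int) := by push_cast; ring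
    rw [hcast, PySem.List.slice_from_natCast,
      show pre ++ 3 :: t = (pre ++ [3]) ++ t by simp,
      show pre.length + 1 = (pre ++ [3]).length by simp,
      List.drop_left]
  rw [split_by_3_diff_alt, hidx]
  simp only [hslice1, hslice2]
  by_cases hp : pre = []
  · simp [hp]
  · simp [hp]

-- loop invariant: A's fold with state (parts, part), 3 ∉ part, produces parts ++ B (part ++ rest)
theorem loopA (rest : List Int) : ∀ (parts : List (List Int)) (part : List Int),
    (3 : Int) ∉ part →
    (rest.foldl pvStepA (parts, part)).1 = parts ++ split_by_3_diff_alt (part ++ rest) := by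
  induction rest with
  | nil =>
      intro parts part hp
      simp [alt_no3 part hp]
  | cons d t ih =>
      intro parts part hp
      by_cases hd : d = (3 : Int)
      · subst hd
        rw [List.foldl_cons, alt_step part t hp]
        by_cases hpe : part = []
        · subst hpe
          have hstep : pvStepA (parts, ([] : List Int)) 3 = (parts, []) := by
            simp [pvStepA]
          rw [hstep]
          simpa using ih parts [] (by simp)
        · have hstep : pvStepA (parts, part) 3 = (parts ++ [part], []) := by
            simp [pvStepA, hpe]
          rw [hstep, ih (parts ++ [part]) [] (by simp)]
          simp [hpe]
      · have hstep : pvStepA (parts, part) d = (parts, part ++ [d]) := by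
          simp [pvStepA, hd]
        rw [List.foldl_cons, hstep]
        have h3 : (3 : Int) ∉ part ++ [d] := by
          intro hmem
          rcases List.mem_append.mp hmem with h1 | h2
          · exact hp h1
          · simp at h2; exact hd h2.symm
        simpa using ih parts (part ++ [d]) h3

-- ===== VERDICT (by name: the statement is the Claim_ definition above) =====
theorem split_by_3_diff_spec : Claim_equal_split_by_3_diff := by
  intro diffs _
  unfold Spec_split_by_3_diff split_by_3_diff
  simpa using loopA diffs [] [] (by simp)
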